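-- pv_equiv track=rewrite | github.com/KsardasY/BMSTU-programming | TFL/lab1.py | exp_generator
-- ===== SOURCE A (Python) =====
-- from typing import List, Set, Tuple, NoReturn
--
-- def arcmul(a11: str, a12: str, a21: str, a22: str, b: str) -> Tuple[str, str]:
--     return f"(arcsum (arcmul {a11} {b}31) (arcmul {a12} {b}32))", \
--         f"(arcsum (arcmul {a21} {b}31) (arcmul {a22} {b}32))"
--
-- def exp_generator(expression: str) -> Tuple[str, str, str, str, str, str]:
--     expr1 = expression[0] + "11"
--     expr2 = expression[0] + "12"
--     expr3 = expression[0] + "21"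
--     expr4 = expression[0] + "22"
--     free_coefs = [(expression[0] + "31", expression[0] + "32")]
--     for x in expression[1:]:
--         free_coefs.append(arcmul(expr1, expr2, expr3, expr4, x))
--         expr1 = f"(arcmul {expr1} {x}11)"
--         expr2 = f"(arcmul {expr2} {x}12)"
--         expr3 = f"(arcmul {expr3} {x}21)"
--         expr4 = f"(arcmul {expr4} {x}22)"
--     free_coef1 = free_coefs[0][0]
--     free_coef2 = free_coefs[0][1]
--     for x in free_coefs[1:]:
--         free_coef1 = f"(arcsum {free_coef1} {x[0]})"
--         free_coef2 = f"(arcsum {free_coef2} {x[1]})"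
--     return expr1, expr2, expr3, expr4, free_coef1, free_coef2
-- ===== SOURCE B (Python) =====
-- from typing import Tuple
--
-- def _chain(c0: str, rest: str, suf: str) -> str:
--     e = c0 + suf
--     for x in rest:
--         e = f"(arcmul {e} {x}{suf})"
--     return e
--
-- def _free(c0: str, rest: str, sufA: str, sufB: str, tag: str) -> str:
--     f = c0 + tag
--     ea = c0 + sufA
--     eb = c0 + sufB
--     for x in rest:
--         f = f"(arcsum {f} (arcsum (arcmul {ea} {x}31) (arcmul {eb} {x}32)))"
--         ea = f"(arcmul {ea} {x}{sufA})"
--         eb = f"(arcmul {eb} {x}{sufB})"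
--     return f
--
-- def exp_generator(expression: str) -> Tuple[str, str, str, str, str, str]:
--     c0, rest = expression[0], expression[1:]
--     return (_chain(c0, rest, "11"),
--             _chain(c0, rest, "12"),
--             _chain(c0, rest, "21"),
--             _chain(c0, rest, "22"),
--             _free(c0, rest, "11", "12", "31"),
--             _free(c0, rest, "21", "22", "32"))
-- ===== Notes on version B (the rewrite author's own statement) =====
-- stated objective: alternative
-- what changed: B decomposes the result into six independent components: a generic suffix-parameterised chain builder called four times for expr1..4, and a free-coefficient builder (tracking only the two needed running exprs) called twice, replacing A's one 4-state loop with an appended pair list plus a second summing loop.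
import Mathlib
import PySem

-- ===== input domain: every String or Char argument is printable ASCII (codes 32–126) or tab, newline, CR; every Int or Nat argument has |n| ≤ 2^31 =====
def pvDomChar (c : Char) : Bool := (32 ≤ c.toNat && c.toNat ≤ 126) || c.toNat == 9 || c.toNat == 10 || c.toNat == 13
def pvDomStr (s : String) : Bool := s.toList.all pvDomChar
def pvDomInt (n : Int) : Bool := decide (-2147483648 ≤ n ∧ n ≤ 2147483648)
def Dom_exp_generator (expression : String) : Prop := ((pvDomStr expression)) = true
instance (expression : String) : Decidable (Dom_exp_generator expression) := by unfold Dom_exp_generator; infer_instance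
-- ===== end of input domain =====

-- B builds each of the six output strings with an independent generic pass (a
-- suffix-parameterised chain builder and a free-coefficient builder), instead of
-- A's single 4-state loop with an intermediate pair list and a second summing loop
-- (objective: alternative).

-- ===== PORT A =====
-- helper arcmul of the Python module
def pvArcmul (a11 a12 a21 a22 b : String) : String × String :=
  ("(arcsum (arcmul " ++ a11 ++ " " ++ b ++ "31) (arcmul " ++ a12 ++ " " ++ b ++ "32))",
   "(arcsum (arcmul " ++ a21 ++ " " ++ b ++ "31) (arcmul " ++ a22 ++ " " ++ b ++ "32))")

-- A's first loop: update expr1..expr4 and append a pair to free_coefs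
def pvLoopA : List Char → String → String → String → String → List (String × String) →
    (String × String × String × String) × List (String × String)
  | [], e1, e2, e3, e4, cs => ((e1, e2, e3, e4), cs)
  | x :: xs, e1, e2, e3, e4, cs =>
      pvLoopA xs
        ("(arcmul " ++ e1 ++ " " ++ x.toString ++ "11)")
        ("(arcmul " ++ e2 ++ " " ++ x.toString ++ "12)")
        ("(arcmul " ++ e3 ++ " " ++ x.toString ++ "21)")
        ("(arcmul " ++ e4 ++ " " ++ x.toString ++ "22)")
        (cs ++ [pvArcmul e1 e2 e3 e4 x.toString])

-- A's second loop over free_coefs[1:]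
def pvSumLoop : List (String × String) → String → String → String × String
  | [], f1, f2 => (f1, f2)
  | (p1, p2) :: ps, f1, f2 =>
      pvSumLoop ps ("(arcsum " ++ f1 ++ " " ++ p1 ++ ")") ("(arcsum " ++ f2 ++ " " ++ p2 ++ ")")

def pvExpA : List Char → String × String × String × String × String × String
  | [] => ("", "", "", "", "", "")   -- Python A raises IndexError on "" (excluded by Pre_)
  | c :: rest =>
      let c0 := c.toString
      let r := pvLoopA rest (c0 ++ "11") (c0 ++ "12") (c0 ++ "21") (c0 ++ "22")
                 [(c0 ++ "31", c0 ++ "32")]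
      match r.2 with
      | [] => ("", "", "", "", "", "")   -- unreachable: free_coefs starts nonempty
      | f :: cs =>
          let fc := pvSumLoop cs f.1 f.2
          (r.1.1, r.1.2.1, r.1.2.2.1, r.1.2.2.2, fc.1, fc.2)

def exp_generator (expression : String) : String × String × String × String × String × String :=
  pvExpA expression.toList

-- ===== PORT B =====
-- B's generic chain builder: one expr component, suffix-parameterised
def pvChain : List Char → String → String → String
  | [], _, e => e
  | x :: xs, suf, e => pvChain xs suf ("(arcmul " ++ e ++ " " ++ x.toString ++ suf ++ ")")

-- B's free-coefficient builder: running sum f plus the two running exprs it needs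
def pvFree : List Char → String → String → String → String → String → String
  | [], _, _, f, _, _ => f
  | x :: xs, sufA, sufB, f, ea, eb =>
      pvFree xs sufA sufB
        ("(arcsum " ++ f ++ " (arcsum (arcmul " ++ ea ++ " " ++ x.toString ++ "31) (arcmul "
          ++ eb ++ " " ++ x.toString ++ "32)))")
        ("(arcmul " ++ ea ++ " " ++ x.toString ++ sufA ++ ")")
        ("(arcmul " ++ eb ++ " " ++ x.toString ++ sufB ++ ")")

def pvExpB : List Char → String × String × String × String × String × String
  | [] => ("", "", "", "", "", "")   -- Python B raises IndexError on "" (excluded by Pre_)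
  | c :: rest =>
      let c0 := c.toString
      (pvChain rest "11" (c0 ++ "11"),
       pvChain rest "12" (c0 ++ "12"),
       pvChain rest "21" (c0 ++ "21"),
       pvChain rest "22" (c0 ++ "22"),
       pvFree rest "11" "12" (c0 ++ "31") (c0 ++ "11") (c0 ++ "12"),
       pvFree rest "21" "22" (c0 ++ "32") (c0 ++ "21") (c0 ++ "22"))

def exp_generator_alt (expression : String) : String × String × String × String × String × String :=
  pvExpB expression.toList

-- ===== PRECONDITION & SPEC =====
-- Pre_ excludes only the empty string, on which both Pythons raise IndexError at expression[0].
def Pre_exp_generator (expression : String) : Prop := expression ≠ ""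
instance (expression : String) : Decidable (Pre_exp_generator expression) := by
  unfold Pre_exp_generator; infer_instance

def pvWitness_exp_generator : String := "ab"

def Spec_exp_generator (expression : String) (out : String × String × String × String × String × String) : Prop := out = exp_generator_alt expression
instance (expression : String) (out : String × String × String × String × String × String) : Decidable (Spec_exp_generator expression out) := by unfold Spec_exp_generator; infer_instance

-- ===== CLAIM (what is proved, stated in full; the proofs are below) =====
def Claim_equal_exp_generator : Prop := ∀ (expression : String), Dom_exp_generator expression → Pre_exp_generator expression → Spec_exp_generator expression (exp_generator expression)

-- ===== LEMMAS AND PROOFS =====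

-- literal-merge facts used to align the two ports' string groupings
theorem pvLitSum (s : String) : (" " : String) ++ ("(arcsum (arcmul " ++ s) = " (arcsum (arcmul " ++ s := by
  rw [← String.append_assoc]; rfl
theorem pvLitClose : ("32))" : String) ++ ")" = "32)))" := rfl
theorem pvMulArg (e x s t : String) (h : s ++ ")" = t) :
    "(arcmul " ++ e ++ " " ++ x ++ s ++ ")" = "(arcmul " ++ e ++ " " ++ x ++ t := by
  rw [String.append_assoc, h]
theorem pvFreeArg (f a b x : String) :
    "(arcsum " ++ f ++ " " ++ ("(arcsum (arcmul " ++ a ++ " " ++ x ++ "31) (arcmul " ++ b ++ " " ++ x ++ "32))") ++ ")"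
      = "(arcsum " ++ f ++ " (arcsum (arcmul " ++ a ++ " " ++ x ++ "31) (arcmul " ++ b ++ " " ++ x ++ "32)))" := by
  simp only [String.append_assoc]
  rw [pvLitClose, pvLitSum]

theorem pvLoopA_cons_acc (xs : List Char) : ∀ (e1 e2 e3 e4 : String) (p : String × String)
    (cs : List (String × String)),
    pvLoopA xs e1 e2 e3 e4 (p :: cs)
      = ((pvLoopA xs e1 e2 e3 e4 cs).1, p :: (pvLoopA xs e1 e2 e3 e4 cs).2) := by
  induction xs with
  | nil => intro e1 e2 e3 e4 p cs; simp [pvLoopA]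
  | cons x xs ih =>
      intro e1 e2 e3 e4 p cs
      simp only [pvLoopA, List.cons_append]
      rw [ih]

theorem pvLoopA_fst (xs : List Char) : ∀ (e1 e2 e3 e4 : String) (cs : List (String × String)),
    (pvLoopA xs e1 e2 e3 e4 cs).1
      = (pvChain xs "11" e1, pvChain xs "12" e2, pvChain xs "21" e3, pvChain xs "22" e4) := by
  induction xs with
  | nil => intro e1 e2 e3 e4 cs; simp [pvLoopA, pvChain]
  | cons x xs ih =>
      intro e1 e2 e3 e4 cs
      simp only [pvLoopA, pvChain]
      rw [ih]
      rw [pvMulArg e1 x.toString "11" "11)" rfl, pvMulArg e2 x.toString "12" "12)" rfl,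
          pvMulArg e3 x.toString "21" "21)" rfl, pvMulArg e4 x.toString "22" "22)" rfl]

theorem pvSumLoop_loopA (xs : List Char) : ∀ (e1 e2 e3 e4 f1 f2 : String),
    pvSumLoop (pvLoopA xs e1 e2 e3 e4 []).2 f1 f2
      = (pvFree xs "11" "12" f1 e1 e2, pvFree xs "21" "22" f2 e3 e4) := by
  induction xs with
  | nil => intro e1 e2 e3 e4 f1 f2; simp [pvLoopA, pvSumLoop, pvFree]
  | cons x xs ih =>
      intro e1 e2 e3 e4 f1 f2
      simp only [pvLoopA, pvFree, List.nil_append]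
      rw [pvLoopA_cons_acc]
      simp only [pvSumLoop, pvArcmul]
      rw [ih]
      rw [pvFreeArg f1 e1 e2 x.toString, pvFreeArg f2 e3 e4 x.toString,
          pvMulArg e1 x.toString "11" "11)" rfl, pvMulArg e2 x.toString "12" "12)" rfl,
          pvMulArg e3 x.toString "21" "21)" rfl, pvMulArg e4 x.toString "22" "22)" rfl]

theorem pvExp_eq (l : List Char) : pvExpA l = pvExpB l := by
  cases l with
  | nil => rfl
  | cons c rest =>
      simp only [pvExpA, pvExpB]
      rw [pvLoopA_cons_acc]
      dsimp only
      rw [pvSumLoop_loopA, pvLoopA_fst]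

-- ===== VERDICT (by name: the statement is the Claim_ definition above) =====
theorem exp_generator_spec : Claim_equal_exp_generator := by
  intro expression _ _
  unfold Spec_exp_generator exp_generator exp_generator_alt
  exact pvExp_eq _
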